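-- pv_equiv track=rewrite | github.com/zeniverse/-algorithm-practice | Programmers/Level3/숫자 게임(1).py | solution
-- ===== SOURCE A (Python) =====
-- def solution(A, B):
--     res = 0
--
--     A.sort()
--     B.sort()
--
--     j = 0
--
--     for i in range(len(A)):
--         if A[j] < B[i]:
--             res += 1
--             j += 1
--
--     return res
-- ===== SOURCE B (Python) =====
-- def solution(A, B):
--     A.sort()
--     B.sort()
--
--     n = len(A)
--
--     # k wins are achievable exactly when the k largest of B's n playable
--     # numbers each beat one of the k smallest numbers of A.
--     def achievable(k):
--         return all(a < b for a, b in zip(A, B[n - k:n]))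
--
--     # binary search for the largest achievable number of wins
--     lo, hi = 0, n
--     while lo < hi:
--         mid = (lo + hi + 1) // 2
--         if achievable(mid):
--             lo = mid
--         else:
--             hi = mid - 1
--
--     return lo
-- ===== Notes on version B (the rewrite author's own statement) =====
-- stated objective: alternative
-- what changed: Replaces the greedy two-pointer scan by a binary search on the answer: the number of wins is the largest k for which the k largest of B's n playable values pairwise beat the k smallest values of A, tested with a zip/all predicate. Pre_ excludes len(B) < len(A), where A raises IndexError.
import Mathlib
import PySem

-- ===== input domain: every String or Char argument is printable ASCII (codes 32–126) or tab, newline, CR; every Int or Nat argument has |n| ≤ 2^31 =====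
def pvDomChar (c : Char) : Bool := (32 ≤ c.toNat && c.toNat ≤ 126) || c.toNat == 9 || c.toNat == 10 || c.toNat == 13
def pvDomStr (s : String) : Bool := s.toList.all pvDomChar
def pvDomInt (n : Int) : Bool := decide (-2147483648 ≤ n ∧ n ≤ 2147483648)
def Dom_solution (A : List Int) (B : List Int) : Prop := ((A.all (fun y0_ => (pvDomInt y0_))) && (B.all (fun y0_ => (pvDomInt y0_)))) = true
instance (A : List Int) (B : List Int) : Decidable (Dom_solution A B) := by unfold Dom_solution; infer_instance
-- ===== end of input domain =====

-- B replaces the greedy two-pointer scan by a binary search on the answer (largest k whose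
-- k largest playable B-values pairwise beat the k smallest A-values); both Pythons sort A and B
-- in place (same mutation), the equivalence proved here is about the return value.

-- ===== PORT A =====
def solution (A : List Int) (B : List Int) : Int :=
  let As := PySem.List.sorted A (fun x => x) false
  let Bs := PySem.List.sorted B (fun x => x) false
  ((PySem.List.pyRange 0 (A.length : Int) 1).foldl
    (fun (st : Int × Int) i =>
      if PySem.List.pyGetD As st.2 0 < PySem.List.pyGetD Bs i 0
      then (st.1 + 1, st.2 + 1) else st) ((0 : Int), (0 : Int))).1

-- ===== PORT B =====
-- Source B's predicate: all(a < b for a, b in zip(A, B[n - k:n]))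
def achievable (As Bs : List Int) (n k : Int) : Bool :=
  (As.zip (PySem.List.slice Bs (some (n - k)) (some n))).all (fun p => decide (p.1 < p.2))

-- Source B's while-loop: lo, hi = 0, n; while lo < hi: mid = (lo+hi+1)//2; …
def bsLoop (As Bs : List Int) (n lo hi : Int) : Int :=
  if h : lo < hi then
    let mid := PySem.Int.floordiv (lo + hi + 1) 2
    if achievable As Bs n mid then bsLoop As Bs n mid hi else bsLoop As Bs n lo (mid - 1)
  else lo
termination_by (hi - lo).toNat
decreasing_by
  · have he : lo + hi + 1 = (lo + 1) + hi := by omega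
    have := PySem.Int.floordiv_two_mid_bounds (show lo + 1 ≤ hi by omega)
    rw [he]
    omega
  · have he : lo + hi + 1 = (lo + 1) + hi := by omega
    have := PySem.Int.floordiv_two_mid_bounds (show lo + 1 ≤ hi by omega)
    rw [he]
    omega

def solution_alt (A : List Int) (B : List Int) : Int :=
  let As := PySem.List.sorted A (fun x => x) false
  let Bs := PySem.List.sorted B (fun x => x) false
  let n : Int := (As.length : Int)
  bsLoop As Bs n 0 n

-- ===== PRECONDITION & SPEC =====
-- Pre_ excludes exactly the inputs where the Python A raises IndexError (B[i] with i ≥ len(B)).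
def Pre_solution (A : List Int) (B : List Int) : Prop := A.length ≤ B.length
instance (A : List Int) (B : List Int) : Decidable (Pre_solution A B) := by unfold Pre_solution; infer_instance
def pvWitness_solution : List Int × List Int := ([2, 1], [1, 3])

def Spec_solution (A : List Int) (B : List Int) (out : Int) : Prop := out = solution_alt A B
instance (A : List Int) (B : List Int) (out : Int) : Decidable (Spec_solution A B out) := by unfold Spec_solution; infer_instance

-- ===== CLAIM (what is proved, stated in full; the proofs are below) =====
def Claim_equal_solution : Prop := ∀ (A : List Int) (B : List Int), Dom_solution A B → Pre_solution A B → Spec_solution A B (solution A B)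

-- ===== LEMMAS AND PROOFS =====

-- pairwise-≤ lists are monotone in their indices
theorem pvMono (l : List Int) (hp : l.Pairwise (· ≤ ·)) (p q : Nat)
    (hpq : p ≤ q) (hq : q < l.length) : l[p]'(by omega) ≤ l[q] := by
  rcases Nat.lt_or_ge p q with h | h
  · exact List.pairwise_iff_getElem.mp hp p q (by omega) hq h
  · have : p = q := by omega
    subst this; exact le_refl _

-- the greedy step of A, abstracted over the rank of the current B value
def pvStep (j c : Int) : Int := if j < c then j + 1 else j

-- running minimum of c + (remaining length) over a list
def pvMfold : Int → List Int → Int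
  | acc, [] => acc
  | acc, c :: cs => pvMfold (min acc (c + (cs.length : Int))) cs

-- closed form: on a nondecreasing list dominating j0, the greedy fold equals the running min
theorem pvM (cs : List Int) (j0 : Int) (hp : cs.Pairwise (· ≤ ·))
    (hj : ∀ c ∈ cs, j0 ≤ c) :
    cs.foldl pvStep j0 = pvMfold (j0 + (cs.length : Int)) cs := by
  induction cs generalizing j0 with
  | nil => simp [pvMfold]
  | cons c cs ih =>
    rcases List.pairwise_cons.mp hp with ⟨hcle, hp'⟩
    have hj0c : j0 ≤ c := hj c (by simp)
    have hstep : j0 + ((c :: cs).length : Int) = (j0 + 1) + cs.length := by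
      simp; omega
    have hacc : min ((j0 + 1) + (cs.length : Int)) (c + cs.length) = pvStep j0 c + cs.length := by
      unfold pvStep; split_ifs with h <;> omega
    have hdom : ∀ c' ∈ cs, pvStep j0 c ≤ c' := by
      intro c' hc'
      have := hcle c' hc'
      unfold pvStep; split_ifs with h <;> omega
    simp only [List.foldl_cons, pvMfold, hstep, hacc]
    exact ih (pvStep j0 c) hp' hdom

-- k is below the running min iff it is below the seed and below every c_i + (len-1-i)
theorem pvMfoldLeIff (cs : List Int) (acc k : Int) :
    k ≤ pvMfold acc cs
      ↔ (k ≤ acc ∧ ∀ i : Nat, (h : i < cs.length) → k ≤ cs[i] + ((cs.length : Int) - 1 - i)) := by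
  induction cs generalizing acc with
  | nil => simp [pvMfold]
  | cons c cs ih =>
    simp only [pvMfold, ih]
    constructor
    · rintro ⟨hmin, hall⟩
      refine ⟨by omega, ?_⟩
      intro i hi
      cases i with
      | zero => simp only [List.getElem_cons_zero, List.length_cons]; push_cast; omega
      | succ j =>
        have hj : j < cs.length := by simpa using hi
        have := hall j hj
        simp only [List.getElem_cons_succ, List.length_cons]
        push_cast at this ⊢
        omega
    · rintro ⟨hacc, hall⟩
      have h0 := hall 0 (by simp)
      simp only [List.getElem_cons_zero, List.length_cons] at h0
      push_cast at h0
      refine ⟨by omega, ?_⟩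
      intro i hi
      have := hall (i + 1) (by simpa using Nat.succ_lt_succ hi)
      simp only [List.getElem_cons_succ, List.length_cons] at this
      push_cast at this ⊢
      omega

-- the running min never exceeds its seed
theorem pvMfoldLeAcc (cs : List Int) (acc : Int) : pvMfold acc cs ≤ acc :=
  ((pvMfoldLeIff cs acc (pvMfold acc cs)).mp (le_refl _)).1

-- on a sorted list, "l[j] < v" means "j below the rank of v"
theorem pvRankIdx (l : List Int) (hp : l.Pairwise (· ≤ ·)) (v : Int) (j : Nat)
    (hj : j < l.length) :
    l[j] < v ↔ j < l.countP (fun a => decide (a < v)) := by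
  induction l generalizing j with
  | nil => simp at hj
  | cons a t ih =>
    rcases List.pairwise_cons.mp hp with ⟨hale, hp'⟩
    have hzero : ¬ a < v → t.countP (fun x => decide (x < v)) = 0 := by
      intro hav
      refine List.countP_eq_zero.mpr ?_
      intro x hx
      have := hale x hx
      simp only [decide_eq_true_eq]
      omega
    cases j with
    | zero =>
      simp only [List.getElem_cons_zero, List.countP_cons]
      by_cases hav : a < v
      · simp [hav]
      · simp [hav, hzero hav]
    | succ j' =>
      have hj' : j' < t.length := by simpa using hj
      have iht := ih hp' j' hj'
      by_cases hav : a < v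
      · have hcnt : (a :: t).countP (fun x => decide (x < v))
            = t.countP (fun x => decide (x < v)) + 1 := by
          simp [hav]
        simp only [List.getElem_cons_succ, hcnt]
        omega
      · have htv : ¬ t[j'] < v := by
          have := hale t[j'] (List.getElem_mem hj')
          omega
        have hcnt : (a :: t).countP (fun x => decide (x < v)) = 0 := by
          simp [hav, hzero hav]
        simp only [List.getElem_cons_succ, hcnt]
        omega

-- A's diagonal pair fold collapses to a single-counter fold
theorem pvDiag {γ : Type} (g : Int → γ → Prop) [inst : ∀ a b, Decidable (g a b)]
    (l : List γ) (j : Int) :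
    l.foldl (fun (st : Int × Int) i => if g st.2 i then (st.1 + 1, st.2 + 1) else st) (j, j)
    = (l.foldl (fun j i => if g j i then j + 1 else j) j,
       l.foldl (fun j i => if g j i then j + 1 else j) j) := by
  induction l generalizing j with
  | nil => rfl
  | cons x l ih =>
    simp only [List.foldl_cons]
    by_cases h : g j x
    · simp only [if_pos h]; exact ih (j + 1)
    · simp only [if_neg h]; exact ih j

-- the rank sequence of B's sorted values against A's sorted values
def pvCrank (AS BS : List Int) (k : Nat) : Int :=
  (AS.countP (fun a => decide (a < BS.getD k 0)) : Int)

def pvCs (AS BS : List Int) (n : Nat) : List Int := (List.range n).map (pvCrank AS BS)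

-- A's counter fold over indices equals the abstract greedy fold over the rank sequence
theorem pvAside (AS BS : List Int) (hp : AS.Pairwise (· ≤ ·)) (n : Nat)
    (hA : AS.length = n) (_hB : n ≤ BS.length) (m : Nat) (hm : m ≤ n) :
    (List.range m).foldl
      (fun (j : Int) (k : Nat) =>
        if PySem.List.pyGetD AS j 0 < PySem.List.pyGetD BS ((k : Nat) : Int) 0 then j + 1 else j) 0
      = (pvCs AS BS m).foldl pvStep 0
    ∧ 0 ≤ (pvCs AS BS m).foldl pvStep 0 ∧ (pvCs AS BS m).foldl pvStep 0 ≤ m := by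
  induction m with
  | zero => simp [pvCs]
  | succ m' ihm =>
    rcases ihm (by omega) with ⟨heq, hge, hle⟩
    set j := (pvCs AS BS m').foldl pvStep 0 with hj
    have hjn : j.toNat < AS.length := by omega
    have hcs : pvCs AS BS (m' + 1) = pvCs AS BS m' ++ [pvCrank AS BS m'] := by
      simp [pvCs, List.range_succ]
    have hbget : PySem.List.pyGetD BS ((m' : Nat) : Int) 0 = BS.getD m' 0 := by
      simp
    have haget : PySem.List.pyGetD AS j 0 = AS[j.toNat] :=
      PySem.List.pyGetD_eq_getElem AS 0 (by omega) (by omega)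
    have hbridge :
        (if PySem.List.pyGetD AS j 0 < PySem.List.pyGetD BS ((m' : Nat) : Int) 0 then j + 1 else j)
        = pvStep j (pvCrank AS BS m') := by
      rw [hbget, haget]
      unfold pvStep pvCrank
      have hiff := pvRankIdx AS hp (BS.getD m' 0) j.toNat hjn
      by_cases hc : AS[j.toNat] < BS.getD m' 0
      · rw [if_pos hc, if_pos (by omega : j < ((AS.countP fun a => decide (a < BS.getD m' 0)) : Int))]
      · rw [if_neg hc, if_neg (by omega : ¬ j < ((AS.countP fun a => decide (a < BS.getD m' 0)) : Int))]
    refine ⟨?_, ?_, ?_⟩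
    · rw [List.range_succ, List.foldl_append, heq, hcs, List.foldl_append]
      simpa using hbridge
    · rw [hcs, List.foldl_append]
      simp only [List.foldl_cons, List.foldl_nil, ← hj]
      unfold pvStep; split_ifs <;> omega
    · rw [hcs, List.foldl_append]
      simp only [List.foldl_cons, List.foldl_nil, ← hj]
      unfold pvStep; split_ifs <;> omega

-- the rank sequence is nondecreasing and nonnegative
theorem pvCsPairwise (AS BS : List Int) (hq : BS.Pairwise (· ≤ ·)) (n : Nat)
    (hB : n ≤ BS.length) : (pvCs AS BS n).Pairwise (· ≤ ·) := by
  unfold pvCs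
  rw [List.pairwise_map]
  refine List.Pairwise.imp_of_mem ?_ (List.pairwise_lt_range)
  intro i j hi hj hij
  have hjn : j < BS.length := lt_of_lt_of_le (List.mem_range.mp hj) hB
  have hmono : BS.getD i 0 ≤ BS.getD j 0 := by
    rw [List.getD_eq_getElem BS 0 (by omega), List.getD_eq_getElem BS 0 hjn]
    exact pvMono BS hq i j (by omega) hjn
  unfold pvCrank
  have := List.countP_mono_left (l := AS)
    (p := fun a => decide (a < BS.getD i 0)) (q := fun a => decide (a < BS.getD j 0))
    (by intro x _ hx; simp only [decide_eq_true_eq] at *; omega)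
  exact_mod_cast this

theorem pvCsNonneg (AS BS : List Int) (n : Nat) : ∀ c ∈ pvCs AS BS n, (0 : Int) ≤ c := by
  intro c hc
  rcases List.mem_map.mp hc with ⟨k, _, rfl⟩
  unfold pvCrank
  exact_mod_cast Nat.zero_le _

-- B's predicate holds exactly when k is at most the running-min value
theorem pvAchIff (AS BS : List Int) (hp : AS.Pairwise (· ≤ ·)) (n : Nat)
    (hA : AS.length = n) (hB : n ≤ BS.length) (k : Int) (hk0 : 0 ≤ k) (hkn : k ≤ (n : Int)) :
    (achievable AS BS (n : Int) k = true) ↔ k ≤ pvMfold (n : Int) (pvCs AS BS n) := by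
  lift k to Nat using hk0 with kn
  have hknn : kn ≤ n := by exact_mod_cast hkn
  -- the slice B[n-k:n] is (drop (n-kn)).take kn
  have hslice : PySem.List.slice BS (some ((n : Int) - (kn : Int))) (some (n : Int))
      = (BS.drop (n - kn)).take kn := by
    have hcast : ((n : Int) - (kn : Int)) = ((n - kn : Nat) : Int) := by omega
    rw [hcast, PySem.List.slice_natCast]
    congr 1
    omega
  have hlen : ((BS.drop (n - kn)).take kn).length = kn := by
    simp only [List.length_take, List.length_drop]
    omega
  have hzlen : (AS.zip ((BS.drop (n - kn)).take kn)).length = kn := by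
    rw [List.length_zip, hA, hlen]; omega
  -- elementwise reading of the all/zip predicate
  have hall : (achievable AS BS (n : Int) (kn : Int) = true)
      ↔ ∀ t : Nat, (ht : t < kn) → AS[t]'(by omega) < BS[n - kn + t]'(by omega) := by
    unfold achievable
    rw [hslice, List.all_eq_true]
    constructor
    · intro h t ht
      have hm : (AS.zip ((BS.drop (n - kn)).take kn))[t]'(by omega) ∈
          AS.zip ((BS.drop (n - kn)).take kn) := List.getElem_mem (by omega)
      have := h _ hm
      rw [List.getElem_zip] at this
      simp only [decide_eq_true_eq] at this
      rw [List.getElem_take, List.getElem_drop] at this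
      exact this
    · intro h p hpmem
      rcases List.mem_iff_getElem.mp hpmem with ⟨t, ht, rfl⟩
      have htk : t < kn := by omega
      rw [List.getElem_zip]
      simp only [decide_eq_true_eq]
      rw [List.getElem_take, List.getElem_drop]
      exact h t htk
  -- translate strict comparisons into rank bounds, then close with the running-min iff
  rw [hall, pvMfoldLeIff]
  have hcslen : (pvCs AS BS n).length = n := by simp [pvCs]
  have hcsget : ∀ i : Nat, (h : i < n) → (pvCs AS BS n)[i]'(by omega) = pvCrank AS BS i := by
    intro i h
    simp [pvCs]
  constructor
  · intro h
    refine ⟨by exact_mod_cast hkn, ?_⟩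
    intro i hi
    rw [hcslen] at hi ⊢
    rw [hcsget i hi]
    by_cases hcase : n - kn ≤ i
    · have ht : i - (n - kn) < kn := by omega
      have := h (i - (n - kn)) ht
      simp only [show n - kn + (i - (n - kn)) = i from by omega] at this
      have hrank := (pvRankIdx AS hp (BS.getD i 0) (i - (n - kn)) (by omega)).mp
        (by rwa [List.getD_eq_getElem BS 0 (by omega)])
      unfold pvCrank
      omega
    · -- i < n - kn: the rank is nonnegative and the tail is long enough
      have hr : (0 : Int) ≤ pvCrank AS BS i := by unfold pvCrank; positivity
      omega
  · rintro ⟨_, h⟩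
    intro t ht
    have hi : n - kn + t < n := by omega
    have := h (n - kn + t) (by omega)
    simp only [hcslen, hcsget (n - kn + t) hi] at this
    have hrank : (t : Int) < pvCrank AS BS (n - kn + t) := by
      unfold pvCrank at this ⊢
      push_cast at this ⊢
      omega
    have := (pvRankIdx AS hp (BS.getD (n - kn + t) 0) t (by omega)).mpr
      (by unfold pvCrank at hrank; exact_mod_cast hrank)
    rwa [List.getD_eq_getElem BS 0 (by omega)] at this

-- binary search on a monotone predicate finds its boundary M
theorem pvBS (AS BS : List Int) (n M : Int) (lo hi : Int)
    (h0 : 0 ≤ lo) (hlM : lo ≤ M) (hMh : M ≤ hi) (hhn : hi ≤ n)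
    (hP : ∀ k, 0 < k → k ≤ n → (achievable AS BS n k = true ↔ k ≤ M)) :
    bsLoop AS BS n lo hi = M := by
  generalize hfuel : (hi - lo).toNat = fuel
  induction fuel using Nat.strong_induction_on generalizing lo hi with
  | _ fuel ih =>
    rw [bsLoop]
    by_cases h : lo < hi
    · simp only [h, dif_pos]
      have hb := PySem.Int.floordiv_two_mid_bounds (show lo + 1 ≤ hi by omega)
      set mid := PySem.Int.floordiv (lo + 1 + hi) 2 with hmid
      have hmid' : PySem.Int.floordiv (lo + hi + 1) 2 = mid := by
        rw [hmid]; congr 1; omega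
      rw [hmid']
      have hiff := hP mid (by omega) (by omega)
      by_cases hc : achievable AS BS n mid = true
      · rw [if_pos hc]
        have hmM : mid ≤ M := hiff.mp hc
        exact ih (hi - mid).toNat (by omega) mid hi (by omega) hmM hMh hhn rfl
      · rw [if_neg hc]
        have hmM : M < mid := by
          by_contra hcon
          exact hc (hiff.mpr (by omega))
        exact ih (mid - 1 - lo).toNat (by omega) lo (mid - 1) h0 hlM (by omega) (by omega) rfl
    · simp only [h, dif_neg, not_false_iff]
      omega

-- ===== VERDICT (by name: the statement is the Claim_ definition above) =====
theorem solution_spec : Claim_equal_solution := by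
  intro A B _hDom hPre
  unfold Spec_solution
  set AS := PySem.List.sorted A (fun x => x) false with hAS
  set BS := PySem.List.sorted B (fun x => x) false with hBS
  have hpA : AS.Pairwise (· ≤ ·) := PySem.List.sorted_pairwise A (fun x => x)
  have hpB : BS.Pairwise (· ≤ ·) := PySem.List.sorted_pairwise B (fun x => x)
  have hlenA : AS.length = A.length := PySem.List.length_sorted A _ _
  have hlenB : BS.length = B.length := PySem.List.length_sorted B _ _
  set n := A.length with hn
  have hBlen : n ≤ BS.length := by rw [hlenB]; exact hPre
  set M := pvMfold (n : Int) (pvCs AS BS n) with hM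
  -- A's side: greedy fold = running min
  have hA : solution A B = M := by
    have hdef : solution A B = ((PySem.List.pyRange 0 ((n : Nat) : Int) 1).foldl
        (fun (st : Int × Int) i =>
          if PySem.List.pyGetD AS st.2 0 < PySem.List.pyGetD BS i 0
          then (st.1 + 1, st.2 + 1) else st) ((0 : Int), (0 : Int))).1 := rfl
    rw [hdef]
    rw [PySem.List.pyRange_zero_nat, List.foldl_map]
    rw [pvDiag (fun j kk => PySem.List.pyGetD AS j 0 < PySem.List.pyGetD BS ((kk : Nat) : Int) 0)]
    rw [(pvAside AS BS hpA n hlenA hBlen n (le_refl n)).1]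
    rw [hM]
    have := pvM (pvCs AS BS n) 0 (pvCsPairwise AS BS hpB n hBlen) (pvCsNonneg AS BS n)
    rw [this]
    simp [pvCs]
  -- B's side: binary search = running min
  have hMle : M ≤ (n : Int) := pvMfoldLeAcc _ _
  have hMge : (0 : Int) ≤ M := by
    rw [hM, pvMfoldLeIff]
    refine ⟨by exact_mod_cast Nat.zero_le n, ?_⟩
    intro i hi
    have hlen : (pvCs AS BS n).length = n := by simp [pvCs]
    have hmem : (pvCs AS BS n)[i] ∈ pvCs AS BS n := List.getElem_mem hi
    have := pvCsNonneg AS BS n _ hmem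
    rw [hlen] at hi ⊢
    omega
  have hB : solution_alt A B = M := by
    have hdef : solution_alt A B = bsLoop AS BS ((AS.length : Nat) : Int) 0 ((AS.length : Nat) : Int) := rfl
    rw [hdef, hlenA]
    exact pvBS AS BS (n : Int) M 0 (n : Int) (le_refl 0) hMge hMle (le_refl _)
      (fun k hk0 hkn => pvAchIff AS BS hpA n hlenA hBlen k (by omega) hkn)
  rw [hA, hB]
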